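-- pv_equiv track=rewrite | github.com/hyang0129/am-i-shipping | collector/github_poller/fetch_timeline.py | _event_id_from_node
-- ===== SOURCE A (Python) =====
-- from typing import Any, Dict, List, Optional
--
-- def _event_id_from_node(node: Dict[str, Any]) -> Optional[int]:
--     """Extract a stable integer id from a timeline node.
--
--     GraphQL returns ``id`` as a base64 Relay node id (string). Our table
--     column is INTEGER so we hash-stabilise it: ``hash(relay_id) & 0x7FFF_FFFF``
--     gives us a deterministic positive int without creating a new column.
--
--     WARNING: collisions cause data loss, not a "safe UPDATE". A hash collision
--     between two events for the same issue would have them map to the same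
--     ``(repo, issue_number, event_id)`` primary key, and the later UPDATE
--     overwrites the earlier event's ``payload_json`` — the earlier event is
--     no longer recoverable from the row because there is no row for it. The
--     31-bit fold is adequate per-issue (dozens of events, collision
--     probability negligible) but the birthday bound over a whole repo is not
--     astronomical. If the repo-wide event count pushes into the hundreds of
--     thousands, this key strategy should be revisited — either widen the
--     column to TEXT and store the raw relay id, or add a separate relay id
--     column with its own UNIQUE constraint.
--     """
--     raw = node.get("id")
--     if raw is None:
--         return None
--     if isinstance(raw, int):
--         return raw
--     # Python's hash() is salted per-process; we want determinism across runs
--     # so the same event maps to the same row. Use a stable fold.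
--     h = 0
--     for ch in str(raw):
--         h = (h * 31 + ord(ch)) & 0xFFFFFFFF
--     return h & 0x7FFFFFFF
-- ===== SOURCE B (Python) =====
-- from typing import Any, Dict, Optional
--
--
-- def _event_id_from_node(node: Dict[str, Any]) -> Optional[int]:
--     raw = node.get("id")
--     if raw is None:
--         return None
--     if isinstance(raw, int):
--         return raw
--     # Walk the string BACK-TO-FRONT, maintaining the running power of 31,
--     # in exact unbounded arithmetic; mask to 31 bits once at the end.
--     total = 0
--     power = 1
--     for ch in reversed(str(raw)):
--         total += ord(ch) * power
--         power *= 31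
--     return total & 0x7FFFFFFF
-- ===== Notes on version B (the rewrite author's own statement) =====
-- stated objective: alternative
-- what changed: Replaces A's forward Horner fold with a per-step 32-bit mask by a back-to-front traversal that maintains a running power of 31 and an exact big-int sum, masked to 31 bits once at the end; the low 31 bits agree because masking mod 2^32 each step preserves them.
import Mathlib
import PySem

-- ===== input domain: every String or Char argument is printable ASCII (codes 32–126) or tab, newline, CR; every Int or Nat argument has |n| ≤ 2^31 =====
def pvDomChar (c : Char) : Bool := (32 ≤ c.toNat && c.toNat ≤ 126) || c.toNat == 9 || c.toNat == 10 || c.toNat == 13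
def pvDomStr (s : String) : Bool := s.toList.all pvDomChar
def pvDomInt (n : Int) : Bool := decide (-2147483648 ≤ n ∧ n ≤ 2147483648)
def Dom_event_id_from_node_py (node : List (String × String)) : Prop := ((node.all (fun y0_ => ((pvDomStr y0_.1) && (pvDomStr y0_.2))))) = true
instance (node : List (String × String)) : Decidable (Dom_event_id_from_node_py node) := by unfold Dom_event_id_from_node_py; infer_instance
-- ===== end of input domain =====

-- B traverses the string back-to-front with a running power of 31 in exact arithmetic, masked once at the end, instead of A's per-step-masked forward Horner fold; alternative decomposition, same O(n).
-- Note: the dict values are Strings under the type convention, so A's `isinstance(raw, int)` branch can never fire and is omitted in both ports.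

-- ===== PORT A =====
-- h = 0; for ch in str(raw): h = (h * 31 + ord(ch)) & 0xFFFFFFFF
def pyHashA (l : List Char) : Int :=
  l.foldl (fun h c => PySem.Int.band (h * 31 + (c.toNat : Int)) 0xFFFFFFFF) 0

def event_id_from_node_py (node : List (String × String)) : Option Int :=
  match PySem.Dict.get? ⟨node⟩ "id" with
  | none => none
  | some raw => some (PySem.Int.band (pyHashA raw.toList) 0x7FFFFFFF)

-- ===== PORT B =====
-- total, power = 0, 1; for ch in reversed(s): total += ord(ch) * power; power *= 31
def pyHashB (l : List Char) : Int :=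
  (l.reverse.foldl (fun st c => (st.1 + (c.toNat : Int) * st.2, st.2 * 31)) ((0 : Int), (1 : Int))).1

def event_id_from_node_py_alt (node : List (String × String)) : Option Int :=
  (PySem.Dict.get? ⟨node⟩ "id").map
    (fun raw => PySem.Int.band (pyHashB raw.toList) 0x7FFFFFFF)

-- ===== PRECONDITION & SPEC =====
def Spec_event_id_from_node_py (node : List (String × String)) (out : Option Int) : Prop := out = event_id_from_node_py_alt node
instance (node : List (String × String)) (out : Option Int) : Decidable (Spec_event_id_from_node_py node out) := by unfold Spec_event_id_from_node_py; infer_instance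

-- ===== CLAIM (what is proved, stated in full; the proofs are below) =====
def Claim_equal_event_id_from_node_py : Prop := ∀ (node : List (String × String)), Dom_event_id_from_node_py node → Spec_event_id_from_node_py node (event_id_from_node_py node)

-- ===== LEMMAS AND PROOFS =====

-- exact (unmasked) Horner fold, the common reference point of both hashes
def hornerE (h : Int) (l : List Char) : Int :=
  l.foldl (fun h c => h * 31 + (c.toNat : Int)) h

lemma band_mask32 (x : Int) (h : 0 ≤ x) : PySem.Int.band x 0xFFFFFFFF = x % 4294967296 := by
  rw [show (0xFFFFFFFF : Int) = ((4294967295 : Nat) : Int) by norm_num,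
      PySem.Int.band_of_nonneg h (by norm_num), Int.toNat_natCast,
      show (4294967295 : Nat) = 2 ^ 32 - 1 by norm_num, Nat.and_two_pow_sub_one_eq_mod]
  omega

lemma band_mask31 (x : Int) (h : 0 ≤ x) : PySem.Int.band x 0x7FFFFFFF = x % 2147483648 := by
  rw [show (0x7FFFFFFF : Int) = ((2147483647 : Nat) : Int) by norm_num,
      PySem.Int.band_of_nonneg h (by norm_num), Int.toNat_natCast,
      show (2147483647 : Nat) = 2 ^ 31 - 1 by norm_num, Nat.and_two_pow_sub_one_eq_mod]
  omega

lemma hornerE_split (l : List Char) : ∀ h : Int, hornerE h l = h * 31 ^ l.length + hornerE 0 l := by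
  induction l with
  | nil => intro h; simp [hornerE]
  | cons c t ih =>
      intro h
      simp only [hornerE, List.foldl_cons] at *
      rw [ih (h * 31 + (c.toNat : Int)), ih ((0 : Int) * 31 + (c.toNat : Int))]
      simp [List.length_cons, pow_succ]
      ring

lemma hornerE_mod_congr (l : List Char) (a : Int) :
    hornerE (a % 4294967296) l % 4294967296 = hornerE a l % 4294967296 := by
  rw [hornerE_split l (a % 4294967296), hornerE_split l a]
  have h1 : a % 4294967296 = a - 4294967296 * (a / 4294967296) := by
    rw [Int.emod_def]
  rw [h1]
  have : (a - 4294967296 * (a / 4294967296)) * 31 ^ l.length + hornerE 0 l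
      = (a * 31 ^ l.length + hornerE 0 l) + 4294967296 * (-(a / 4294967296) * 31 ^ l.length) := by
    ring
  rw [this, Int.add_mul_emod_self_left]

lemma pyHashA_eq_mod (l : List Char) :
    ∀ h : Int, 0 ≤ h → h < 4294967296 →
      l.foldl (fun h c => PySem.Int.band (h * 31 + (c.toNat : Int)) 0xFFFFFFFF) h
        = hornerE h l % 4294967296 := by
  induction l with
  | nil =>
      intro h h0 h1
      simp only [List.foldl_nil, hornerE]
      omega
  | cons c t ih =>
      intro h h0 h1
      simp only [List.foldl_cons, hornerE]
      have hx : 0 ≤ h * 31 + (c.toNat : Int) := by positivity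
      rw [band_mask32 _ hx,
          ih _ (Int.emod_nonneg _ (by norm_num)) (Int.emod_lt_of_pos _ (by norm_num)),
          hornerE_mod_congr]
      rfl

-- B's reversed fold computes the exact Horner value and the running power
lemma foldB_eq (l : List Char) :
    ∀ t p : Int,
      l.reverse.foldl (fun st c => (st.1 + (c.toNat : Int) * st.2, st.2 * 31)) (t, p)
        = (t + p * hornerE 0 l, p * 31 ^ l.length) := by
  induction l with
  | nil => intro t p; simp [hornerE]
  | cons c r ih =>
      intro t p
      simp only [List.reverse_cons, List.foldl_append, List.foldl_cons, List.foldl_nil]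
      rw [ih t p]
      have hc : hornerE 0 (c :: r) = (c.toNat : Int) * 31 ^ r.length + hornerE 0 r := by
        have := hornerE_split r ((0 : Int) * 31 + (c.toNat : Int))
        simp only [hornerE, List.foldl_cons] at *
        rw [this]; ring
      rw [hc]
      simp only [List.length_cons, pow_succ]
      exact Prod.ext (by ring) (by ring)

lemma pyHashB_eq (l : List Char) : pyHashB l = hornerE 0 l := by
  unfold pyHashB
  rw [foldB_eq l 0 1]
  ring

lemma hornerE_nonneg (l : List Char) : ∀ h : Int, 0 ≤ h → 0 ≤ hornerE h l := by
  induction l with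
  | nil => intro h h0; simpa [hornerE] using h0
  | cons c t ih =>
      intro h h0
      simp only [hornerE, List.foldl_cons] at *
      exact ih _ (by positivity)

lemma hash_agree (l : List Char) :
    PySem.Int.band (pyHashA l) 0x7FFFFFFF = PySem.Int.band (pyHashB l) 0x7FFFFFFF := by
  have hA : pyHashA l = hornerE 0 l % 4294967296 :=
    pyHashA_eq_mod l 0 le_rfl (by norm_num)
  have hnn : 0 ≤ hornerE 0 l := hornerE_nonneg l 0 le_rfl
  rw [hA, pyHashB_eq, band_mask31 _ (Int.emod_nonneg _ (by norm_num)), band_mask31 _ hnn]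
  have : (4294967296 : Int) = 2147483648 * 2 := by norm_num
  rw [this, Int.emod_emod_of_dvd _ ⟨2, by ring⟩]

-- ===== VERDICT (by name: the statement is the Claim_ definition above) =====
theorem event_id_from_node_py_spec : Claim_equal_event_id_from_node_py := by
  intro node _
  unfold Spec_event_id_from_node_py event_id_from_node_py event_id_from_node_py_alt
  cases PySem.Dict.get? ⟨node⟩ "id" with
  | none => rfl
  | some raw => simp [Option.map, hash_agree raw.toList]
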